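-- pv_equiv track=rewrite | github.com/oway13/Schoolwork | 15Fall/1133 Intro to Programming Concepts/Homework/hw8.py | filestrip
-- ===== SOURCE A (Python) =====
-- def filestrip(file):
--     #Returns List Containing Each Individual Word And A Lot Of Vestigial Spaces
--     fstrip = []
--     for line in file:
--         fstring = line
--         if fstring != '':
--             for char in '()[]{}=!<>.,:+-*/\%$':
--                 fstring = fstring.replace(char, ' ')
--             fstring = fstring.strip()
--             fstring = fstring.split(' ')
--             fstrip += [fstring]
--     return fstrip
-- ===== SOURCE B (Python) =====
-- _PUNCT = frozenset('()[]{}=!<>.,:+-*/\\%$')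
--
-- def filestrip(file):
--     # One char-at-a-time pass per line instead of 18 whole-string replace scans.
--     return [
--         ''.join(' ' if c in _PUNCT else c for c in line).strip().split(' ')
--         for line in file
--         if line != ''
--     ]
-- ===== Notes on version B (the rewrite author's own statement) =====
-- stated objective: idiomatic
-- what changed: Replaced A's accumulator loop doing 18 sequential whole-string .replace scans per line with a single comprehension that rewrites each line in one character-level pass against a precomputed punctuation set.
import Mathlib
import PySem

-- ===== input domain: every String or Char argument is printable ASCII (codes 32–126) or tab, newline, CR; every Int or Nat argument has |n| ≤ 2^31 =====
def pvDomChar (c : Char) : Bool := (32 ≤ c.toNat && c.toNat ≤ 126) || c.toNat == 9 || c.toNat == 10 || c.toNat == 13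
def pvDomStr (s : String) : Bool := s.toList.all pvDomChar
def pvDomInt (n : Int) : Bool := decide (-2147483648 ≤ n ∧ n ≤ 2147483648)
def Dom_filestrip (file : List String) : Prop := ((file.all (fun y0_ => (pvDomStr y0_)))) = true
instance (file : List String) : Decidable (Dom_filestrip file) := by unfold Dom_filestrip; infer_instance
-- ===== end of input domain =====

-- B replaces A's 18 whole-string .replace scans per line with one character-level
-- pass against a precomputed punctuation set, and the accumulator loop with a
-- filter+map comprehension (idiomatic; same return value).

-- s.split(' ') (shared literal split helper, sep is the non-empty " ")
def pySplitSpace (s : String) : List String :=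
  (PySem.Chars.splitOn s.toList [' ']).map String.ofList

-- ===== PORT A =====
def filestrip (file : List String) : List (List String) :=
  file.foldl (fun fstrip line =>
    if line != "" then
      -- for char in '()[]{}=!<>.,:+-*/\%$': fstring = fstring.replace(char, ' ')
      let fstring := "()[]{}=!<>.,:+-*/\\%$".toList.foldl
        (fun s ch => PySem.Str.replace s (String.ofList [ch]) " ") line
      let fstring := PySem.Str.strip fstring
      fstrip ++ [pySplitSpace fstring]
    else fstrip) []

-- ===== PORT B =====
def pvPunct : List Char := "()[]{}=!<>.,:+-*/\\%$".toList

def filestrip_alt (file : List String) : List (List String) :=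
  (file.filter (fun line => line != "")).map (fun line =>
    pySplitSpace (PySem.Str.strip
      (String.ofList (line.toList.map (fun c => if c ∈ pvPunct then ' ' else c)))))

-- ===== PRECONDITION & SPEC =====
def Spec_filestrip (file : List String) (out : List (List String)) : Prop := out = filestrip_alt file
instance (file : List String) (out : List (List String)) : Decidable (Spec_filestrip file out) := by unfold Spec_filestrip; infer_instance

-- ===== CLAIM (what is proved, stated in full; the proofs are below) =====
def Claim_equal_filestrip : Prop := ∀ (file : List String), Dom_filestrip file → Spec_filestrip file (filestrip file)

-- ===== LEMMAS AND PROOFS =====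

-- replacing the single char a by ' ' is a pointwise map (fuel recursion of Chars.replace.go)
lemma pv_replace_go_single (a : Char) :
    ∀ (fuel : Nat) (l acc : List Char), l.length ≤ fuel →
      PySem.Chars.replace.go [a] [' '] fuel l acc
        = acc.reverse ++ l.map (fun c => if c = a then ' ' else c) := by
  intro fuel
  induction fuel with
  | zero =>
    intro l acc h
    have : l = [] := List.eq_nil_of_length_eq_zero (Nat.le_zero.mp h)
    subst this
    simp [PySem.Chars.replace.go]
  | succ n ih =>
    intro l acc h
    cases l with
    | nil => simp [PySem.Chars.replace.go]
    | cons c t =>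
      have ht : t.length ≤ n := Nat.le_of_succ_le_succ (by simpa using h)
      by_cases hc : c = a
      · rw [show PySem.Chars.replace.go [a] [' '] (n+1) (c :: t) acc
              = PySem.Chars.replace.go [a] [' '] n t (' ' :: acc) by
            simp [PySem.Chars.replace.go, List.isPrefixOf, hc]]
        rw [ih t (' ' :: acc) ht]
        simp [hc]
      · have hb : (a == c) = false := by
          simp only [beq_eq_false_iff_ne]; exact fun he => hc he.symm
        rw [show PySem.Chars.replace.go [a] [' '] (n+1) (c :: t) acc
              = PySem.Chars.replace.go [a] [' '] n t (c :: acc) by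
            simp [PySem.Chars.replace.go, List.isPrefixOf, hb]]
        rw [ih t (c :: acc) ht]
        simp [hc]

lemma pv_replace_single (a : Char) (s : List Char) :
    PySem.Chars.replace s [a] [' '] = s.map (fun c => if c = a then ' ' else c) := by
  unfold PySem.Chars.replace
  simp only [List.isEmpty_cons, Bool.false_eq_true, if_false]
  simpa using pv_replace_go_single a s.length s [] le_rfl

-- the sequence of single-char replaces over ps is one map over membership in ps
lemma pv_foldl_replace (ps : List Char) (s : String) :
    (ps.foldl (fun s ch => PySem.Str.replace s (String.ofList [ch]) " ") s).toList
      = s.toList.map (fun c => if c ∈ ps then ' ' else c) := by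
  induction ps generalizing s with
  | nil => simp
  | cons a ps ih =>
    simp only [List.foldl_cons]
    rw [ih]
    have hrep : (PySem.Str.replace s (String.ofList [a]) " ").toList
        = s.toList.map (fun c => if c = a then ' ' else c) := by
      rw [PySem.Str.toList_replace]
      simp only [String.toList_ofList]
      simpa using pv_replace_single a s.toList
    rw [hrep, List.map_map]
    apply List.map_congr_left
    intro c _
    by_cases hc : c = a
    · subst hc
      simp only [Function.comp, List.mem_cons, true_or, if_true]
      split <;> rfl
    · simp [Function.comp, hc]

-- per-line agreement of the two word extractors
set_option maxRecDepth 4000 in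
lemma pv_line_eq (line : String) :
    pySplitSpace (PySem.Str.strip
        ("()[]{}=!<>.,:+-*/\\%$".toList.foldl
          (fun s ch => PySem.Str.replace s (String.ofList [ch]) " ") line))
      = pySplitSpace (PySem.Str.strip
          (String.ofList (line.toList.map (fun c => if c ∈ pvPunct then ' ' else c)))) := by
  have hL : ("()[]{}=!<>.,:+-*/\\%$".toList.foldl
        (fun s ch => PySem.Str.replace s (String.ofList [ch]) " ") line).toList
      = (String.ofList (line.toList.map (fun c => if c ∈ pvPunct then ' ' else c))).toList := by
    rw [pv_foldl_replace, String.toList_ofList]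
    unfold pvPunct
    simp
  rw [String.toList_inj.mp hL]

-- ===== VERDICT (by name: the statement is the Claim_ definition above) =====
theorem filestrip_spec : Claim_equal_filestrip := by
  intro file _
  unfold Spec_filestrip filestrip filestrip_alt
  rw [PySem.List.foldl_append_if (fun line => line != "")
      (fun line => pySplitSpace (PySem.Str.strip
        ("()[]{}=!<>.,:+-*/\\%$".toList.foldl
          (fun s ch => PySem.Str.replace s (String.ofList [ch]) " ") line)))]
  simp only [List.nil_append]
  apply List.map_congr_left
  intro line _
  exact pv_line_eq line
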